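-- pv_equiv track=rewrite | github.com/HannoVB1/Dodona | bovensteboven.py | bovensteboven
-- ===== SOURCE A (Python) =====
-- def bovensteboven(number):
--     arr = [*str(number)]
--
--     bovensteboven = True
--     for i in range(0,len(arr)):
--         side1 = arr[i]
--         side2 = arr[len(arr)-i -1]
--
--         if(not((side1 == "0" and side2 == "0") or (side1 == "8" and side2 == "8") or (side1 == "6" and side2 == "9") or (side1 == "9" and side2 == "6") or (side1 == "1" and side2 == "1"))):
--             bovensteboven = False
--
--     return bovensteboven
-- ===== SOURCE B (Python) =====
-- ROT = {'0': '0', '1': '1', '8': '8', '6': '9', '9': '6'}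
--
--
-- def bovensteboven(number):
--     s = str(number)
--     if all(c in ROT for c in s):
--         return ''.join(ROT[c] for c in reversed(s)) == s
--     return False
-- ===== Notes on version B (the rewrite author's own statement) =====
-- stated objective: idiomatic
-- what changed: Replaces the pairwise index loop over (i, n-1-i) character pairs by a whole-string transform: map every character through the upside-down-rotation dict over the reversed string and compare the rotated string to the original once, with an up-front validity check that every character is rotatable.
import Mathlib
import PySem

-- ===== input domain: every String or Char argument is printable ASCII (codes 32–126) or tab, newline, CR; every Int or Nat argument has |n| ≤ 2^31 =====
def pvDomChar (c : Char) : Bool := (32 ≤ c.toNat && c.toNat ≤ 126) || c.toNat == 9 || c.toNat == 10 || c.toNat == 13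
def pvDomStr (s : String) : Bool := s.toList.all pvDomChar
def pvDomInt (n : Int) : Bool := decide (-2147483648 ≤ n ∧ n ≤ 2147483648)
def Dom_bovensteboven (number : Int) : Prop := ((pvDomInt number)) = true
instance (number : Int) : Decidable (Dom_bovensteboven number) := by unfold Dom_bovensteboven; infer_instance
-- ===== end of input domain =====

-- B replaces A's pairwise index loop by mapping the reversed digit string through the rotation dict and one equality comparison (idiomatic; same cost).
-- ===== PORT A =====
-- pair check from A's if-condition, in A's branch order
def pvPairOK (a b : Char) : Bool :=
  (a == '0' && b == '0') || (a == '8' && b == '8') || (a == '6' && b == '9') ||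
    (a == '9' && b == '6') || (a == '1' && b == '1')

-- arr[i] and arr[len(arr)-i-1] are always in range for i in range(len(arr)),
-- so pyGetD with a dummy default is exact here.
def bovensteboven (number : Int) : Bool :=
  let arr := PySem.Int.toChars number
  (PySem.List.pyRange 0 (arr.length : Int) 1).foldl
    (fun b i =>
      let side1 := PySem.List.pyGetD arr i ' '
      let side2 := PySem.List.pyGetD arr ((arr.length : Int) - i - 1) ' '
      if !(pvPairOK side1 side2) then false else b)
    true

-- ===== PORT B =====
-- the ROT dict of Source B as an Option-valued lookup
def pvRot? (c : Char) : Option Char :=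
  if c == '0' then some '0'
  else if c == '1' then some '1'
  else if c == '8' then some '8'
  else if c == '6' then some '9'
  else if c == '9' then some '6'
  else none

def bovensteboven_alt (number : Int) : Bool :=
  let s := PySem.Int.toChars number
  if s.all (fun c => (pvRot? c).isSome) then
    (s.reverse.map (fun c => (pvRot? c).getD c)) == s
  else false

-- ===== PRECONDITION & SPEC =====
def Spec_bovensteboven (number : Int) (out : Bool) : Prop := out = bovensteboven_alt number
instance (number : Int) (out : Bool) : Decidable (Spec_bovensteboven number out) := by unfold Spec_bovensteboven; infer_instance

-- ===== CLAIM (what is proved, stated in full; the proofs are below) =====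
def Claim_equal_bovensteboven : Prop := ∀ (number : Int), Dom_bovensteboven number → Spec_bovensteboven number (bovensteboven number)

-- ===== LEMMAS AND PROOFS =====
theorem pv_foldl_guard (l : List Int) (p : Int → Bool) (b : Bool) :
    l.foldl (fun acc i => if !(p i) then false else acc) b = (b && l.all p) := by
  induction l generalizing b with
  | nil => simp
  | cons x xs ih => simp only [List.foldl, List.all_cons]; rw [ih]; cases p x <;> cases b <;> simp

theorem pv_pairOK_rot (a b : Char) :
    pvPairOK a b = ((pvRot? b).isSome && ((pvRot? b).getD b == a)) := by
  simp only [pvPairOK, pvRot?, Bool.beq_eq_decide_eq]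
  by_cases h0 : b = '0' <;> by_cases h1 : b = '1' <;> by_cases h8 : b = '8' <;>
    by_cases h6 : b = '6' <;> by_cases h9 : b = '9' <;> subst_vars <;>
    simp_all <;> simp [eq_comm]

theorem pv_key (s : List Char) :
    (PySem.List.pyRange 0 (s.length : Int) 1).foldl
      (fun b i =>
        let side1 := PySem.List.pyGetD s i ' '
        let side2 := PySem.List.pyGetD s ((s.length : Int) - i - 1) ' '
        if !(pvPairOK side1 side2) then false else b)
      true
    = (if s.all (fun c => (pvRot? c).isSome) then
        (s.reverse.map (fun c => (pvRot? c).getD c)) == s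
      else false) := by
  rw [show (fun (b : Bool) (i : Int) =>
        let side1 := PySem.List.pyGetD s i ' '
        let side2 := PySem.List.pyGetD s ((s.length : Int) - i - 1) ' '
        if !(pvPairOK side1 side2) then false else b)
      = (fun (b : Bool) (i : Int) =>
        if !(pvPairOK (PySem.List.pyGetD s i ' ')
              (PySem.List.pyGetD s ((s.length : Int) - i - 1) ' ')) then false else b) from rfl,
    pv_foldl_guard, PySem.List.pyRange_zero_natCast, Bool.true_and, List.all_map]
  have hp : ∀ (k : Nat) (hk : k < s.length),
      pvPairOK (PySem.List.pyGetD s ((k : Nat) : Int) ' ')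
        (PySem.List.pyGetD s ((s.length : Int) - ((k : Nat) : Int) - 1) ' ')
      = ((pvRot? (s[s.length - 1 - k]'(by omega))).isSome &&
          ((pvRot? (s[s.length - 1 - k]'(by omega))).getD (s[s.length - 1 - k]'(by omega))
            == s[k]'hk)) := by
    intro k hk
    have h2 : ((s.length : Int)) - (k : Int) - 1 = ((s.length - 1 - k : Nat) : Int) := by omega
    rw [h2, PySem.List.pyGetD_natCast, PySem.List.pyGetD_natCast, pv_pairOK_rot,
      List.getD_eq_getElem s ' ' hk, List.getD_eq_getElem s ' ' (by omega)]
  by_cases hall : s.all (fun c => (pvRot? c).isSome)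
  · rw [if_pos hall]
    have hrot : ∀ (j : Nat) (hj : j < s.length), (pvRot? (s[j]'hj)).isSome :=
      fun j hj => List.all_eq_true.mp hall _ (List.getElem_mem hj)
    rw [Bool.eq_iff_iff, List.all_eq_true, beq_iff_eq]
    constructor
    · intro h
      apply List.ext_getElem (by simp)
      intro k hk1 hk2
      have := h k (List.mem_range.mpr hk2)
      simp only [Function.comp_apply] at this
      rw [hp k hk2] at this
      have h2 := (Bool.and_eq_true .. |>.mp this).2
      rw [beq_iff_eq] at h2
      simpa [List.getElem_reverse, List.getElem_map] using h2
    · intro h k hkmem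
      have hk := List.mem_range.mp hkmem
      simp only [Function.comp_apply]
      rw [hp k hk]
      refine Bool.and_eq_true .. |>.mpr ⟨hrot _ (by omega), ?_⟩
      rw [beq_iff_eq]
      have := congrArg (fun l => l[k]?) h
      simpa [List.getElem?_eq_getElem, hk, List.getElem_reverse, List.getElem_map] using this
  · rw [if_neg hall]
    obtain ⟨c, hc, hbad⟩ : ∃ c ∈ s, ¬ ((pvRot? c).isSome = true) := by
      simpa [List.all_eq_true] using hall
    obtain ⟨j, hj, rfl⟩ := List.getElem_of_mem hc
    rw [List.all_eq_false]
    refine ⟨s.length - 1 - j, List.mem_range.mpr (by omega), ?_⟩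
    simp only [Function.comp_apply]
    rw [hp _ (by omega)]
    have hj2 : s.length - 1 - (s.length - 1 - j) = j := by omega
    simp [hj2, hbad]

-- ===== VERDICT (by name: the statement is the Claim_ definition above) =====
theorem bovensteboven_spec : Claim_equal_bovensteboven := by
  intro number _
  unfold Spec_bovensteboven bovensteboven bovensteboven_alt
  exact pv_key (PySem.Int.toChars number)
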